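-- pv_equiv track=rewrite | github.com/mfroelund/json2tab | json2tab/ModelNameParser.py | get_manufacturer_match_pattern
-- ===== SOURCE A (Python) =====
-- def get_manufacturer_match_pattern(pattern: str) -> str:
--     """Builds the regex pattern to match manufacturer name.
--
--     Args:
--         pattern (str): Input regex containing a manufacturer group
--
--     Returns:
--         regex that only matches the manufacturer group
--     """
--     open_pos = pattern.find("(?P<manufacturer>")
--
--     if open_pos >= 0:
--         pos = open_pos
--         depth = 1
--
--         while depth > 0:
--             if pattern.find("(", pos + 1) < pattern.find(")", pos + 1):
--                 pos = pattern.find("(", pos + 1)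
--                 depth += 1
--             else:
--                 close_pos = pattern.find(")", pos + 1)
--                 pos = pattern.find(")", pos + 1)
--                 depth -= 1
--
--         manufacturer_pattern = pattern[open_pos : close_pos + 1]
--
--         # Match all shouldn't be a specific manufacturer pattern
--         if manufacturer_pattern == r"(?P<manufacturer>\w+)":
--             manufacturer_pattern = None
--
--         return manufacturer_pattern
--
--     return None
-- ===== SOURCE B (Python) =====
-- def get_manufacturer_match_pattern(pattern: str) -> str:
--     """Builds the regex pattern to match manufacturer name.
--
--     Single linear scan: find the group opener, then walk the characters
--     once, tracking parenthesis depth, until the group's matching ')'.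
--     """
--     open_pos = pattern.find("(?P<manufacturer>")
--     if open_pos < 0:
--         return None
--     depth = 0
--     for i in range(open_pos, len(pattern)):
--         ch = pattern[i]
--         if ch == "(":
--             depth += 1
--         elif ch == ")":
--             depth -= 1
--             if depth == 0:
--                 group = pattern[open_pos : i + 1]
--                 # Match all shouldn't be a specific manufacturer pattern
--                 return None if group == r"(?P<manufacturer>\w+)" else group
--     return None
-- ===== Notes on version B (the rewrite author's own statement) =====
-- stated objective: alternative
-- what changed: A repeatedly calls str.find for the next open and close parenthesis from the current position (with -1 wraparound arithmetic); B does one linear character scan from the group opener tracking parenthesis depth.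
-- intended difference: On patterns containing the manufacturer tag but no closing parenthesis after it, A returns the empty string (its close-paren find yields -1 and it slices pattern[open:0]); B returns None, the intended value for a group that is never closed, consistent with A's own no-group answer. — e.g. on get_manufacturer_match_pattern("(?P<manufacturer>"): A returns some "", B returns none
-- outside the precondition, e.g. on get_manufacturer_match_pattern('))(?P<manufacturer>x)'): A returns '', B returns '(?P<manufacturer>x)'
import Mathlib
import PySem

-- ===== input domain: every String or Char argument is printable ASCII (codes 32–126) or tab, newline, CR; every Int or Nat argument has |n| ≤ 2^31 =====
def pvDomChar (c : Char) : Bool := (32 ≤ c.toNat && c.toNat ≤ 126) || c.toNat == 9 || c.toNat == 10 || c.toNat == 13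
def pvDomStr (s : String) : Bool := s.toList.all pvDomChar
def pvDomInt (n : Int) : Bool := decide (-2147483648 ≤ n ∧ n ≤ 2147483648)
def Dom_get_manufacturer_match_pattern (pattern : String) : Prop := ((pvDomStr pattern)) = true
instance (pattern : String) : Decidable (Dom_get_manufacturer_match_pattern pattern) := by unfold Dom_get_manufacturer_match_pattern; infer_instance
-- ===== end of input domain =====

-- B replaces A's find(-1)-arithmetic while loop by one linear character scan that tracks
-- parenthesis depth (objective: alternative). Inputs on which A's loop diverges are
-- excluded by Pre_; the stated D_ difference covers A's accidental '' on unclosed groups.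

-- ===== PORT A =====
-- the Python while loop: depth > 0; compare find("(",pos+1) with find(")",pos+1);
-- the fuel argument only makes the (possibly diverging) while loop total — under
-- Pre_ it is never exhausted (positions strictly advance, one step per character).
def pvALoop (cs : List Char) : Nat → Int → Int → Int → Option Int
  | 0, _, _, _ => none
  | fuel + 1, pos, depth, close =>
    if depth > 0 then
      let o := PySem.Chars.findFrom cs ['('] (pos + 1) none
      let c := PySem.Chars.findFrom cs [')'] (pos + 1) none
      if o < c then pvALoop cs fuel o (depth + 1) close
      else pvALoop cs fuel c (depth - 1) c
    else some close

def get_manufacturer_match_pattern (pattern : String) : Option String :=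
  let cs := pattern.toList
  let open_pos := PySem.Chars.find cs "(?P<manufacturer>".toList
  if open_pos ≥ 0 then
    match pvALoop cs (cs.length + 1) open_pos 1 0 with
    | none => none   -- fuel exhausted: the Python while loop diverges here (outside Pre_)
    | some close =>
      let mp := PySem.List.slice cs (some open_pos) (some (close + 1))
      if mp = "(?P<manufacturer>\\w+)".toList then none else some (String.mk mp)
  else none

-- ===== PORT B =====
-- Source B's for-loop over pattern[open_pos:]: depth tracking, acc accumulates the scanned
-- characters (reversed) so that `some (c :: acc).reverse` is pattern[open_pos : i + 1]
def pvBLoop : Int → List Char → List Char → Option (List Char)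
  | _, _, [] => none
  | depth, acc, c :: rest =>
    if c = '(' then pvBLoop (depth + 1) (c :: acc) rest
    else if c = ')' then
      if depth - 1 = 0 then some (c :: acc).reverse
      else pvBLoop (depth - 1) (c :: acc) rest
    else pvBLoop depth (c :: acc) rest

def get_manufacturer_match_pattern_alt (pattern : String) : Option String :=
  let cs := pattern.toList
  let open_pos := PySem.Chars.find cs "(?P<manufacturer>".toList
  if open_pos < 0 then none
  else
    match pvBLoop 0 [] (cs.drop open_pos.toNat) with
    | none => none
    | some g => if g = "(?P<manufacturer>\\w+)".toList then none else some (String.mk g)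

-- ===== PRECONDITION & SPEC =====
-- shape helper for Pre_/D_: relative index of the ')' that closes the group opened at the
-- start of this suffix (a plain balanced-parenthesis scan over the input characters)
def pvMatchClose : List Char → Int → Option Nat
  | [], _ => none
  | c :: rest, d =>
    if c = '(' then (pvMatchClose rest (d + 1)).map (· + 1)
    else if c = ')' then
      if d - 1 = 0 then some 0 else (pvMatchClose rest (d - 1)).map (· + 1)
    else (pvMatchClose rest d).map (· + 1)

-- Pre_ excludes tag-containing patterns on which Python's find returning -1 makes A's
-- while loop restart from position -1: on those A usually diverges (e.g. on
-- '(?P<manufacturer>abc)') and otherwise returns an accidental slice of the rescanned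
-- prefix (e.g. the empty string on '))(?P<manufacturer>x)').  Kept inside Pre_: patterns
-- without the tag; patterns whose manufacturer group has a matching closing parenthesis
-- followed by a further opening parenthesis (the loop then visits the parens in order and
-- stops at the matching close); and patterns with no closing parenthesis after the tag at
-- all (one loop iteration — the D_ region below).
def pvPreB (pattern : String) : Bool :=
  let cs := pattern.toList
  let op := PySem.Chars.find cs "(?P<manufacturer>".toList
  if op < 0 then true
  else
    match pvMatchClose (cs.drop op.toNat) 0 with
    | some m => decide ('(' ∈ cs.drop (op.toNat + m + 1))
    | none => decide (')' ∉ cs.drop (op.toNat + 1))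

def Pre_get_manufacturer_match_pattern (pattern : String) : Prop := pvPreB pattern = true
instance (pattern : String) : Decidable (Pre_get_manufacturer_match_pattern pattern) := by
  unfold Pre_get_manufacturer_match_pattern; infer_instance

def pvWitness_get_manufacturer_match_pattern : String := "(?P<manufacturer>[A-Z]+) (.*)"

-- On patterns that contain the manufacturer tag but no closing parenthesis after it, A
-- returns the empty string (its close-paren find yields -1 and it slices
-- pattern[open_pos:0]); B returns None, the intended value for a group that is never
-- closed, matching A's own no-group answer.
def D_get_manufacturer_match_pattern (pattern : String) : Prop :=
  0 ≤ PySem.Chars.find pattern.toList "(?P<manufacturer>".toList ∧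
  ')' ∉ pattern.toList.drop ((PySem.Chars.find pattern.toList "(?P<manufacturer>".toList).toNat + 1)
instance (pattern : String) : Decidable (D_get_manufacturer_match_pattern pattern) := by
  unfold D_get_manufacturer_match_pattern; infer_instance

def Spec_get_manufacturer_match_pattern (pattern : String) (out : Option String) : Prop :=
  ¬ D_get_manufacturer_match_pattern pattern → out = get_manufacturer_match_pattern_alt pattern
instance (pattern : String) (out : Option String) : Decidable (Spec_get_manufacturer_match_pattern pattern out) := by
  unfold Spec_get_manufacturer_match_pattern; infer_instance

def pvDiffWitness_get_manufacturer_match_pattern : String := "(?P<manufacturer>"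
def pvDiffWitnessOut_get_manufacturer_match_pattern : (Option String) × (Option String) := (some "", none)

-- ===== CLAIM (what is proved, stated in full; the proofs are below) =====
def Claim_unchanged_get_manufacturer_match_pattern : Prop := ∀ (pattern : String), Dom_get_manufacturer_match_pattern pattern → Pre_get_manufacturer_match_pattern pattern → Spec_get_manufacturer_match_pattern pattern (get_manufacturer_match_pattern pattern)
def Claim_changed_get_manufacturer_match_pattern : Prop := Dom_get_manufacturer_match_pattern (pvDiffWitness_get_manufacturer_match_pattern) ∧ Pre_get_manufacturer_match_pattern (pvDiffWitness_get_manufacturer_match_pattern) ∧ D_get_manufacturer_match_pattern (pvDiffWitness_get_manufacturer_match_pattern) ∧ get_manufacturer_match_pattern (pvDiffWitness_get_manufacturer_match_pattern) = pvDiffWitnessOut_get_manufacturer_match_pattern.1 ∧ get_manufacturer_match_pattern_alt (pvDiffWitness_get_manufacturer_match_pattern) = pvDiffWitnessOut_get_manufacturer_match_pattern.2 ∧ pvDiffWitnessOut_get_manufacturer_match_pattern.1 ≠ pvDiffWitnessOut_get_manufacturer_match_pattern.2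
def Claim_exact_get_manufacturer_match_pattern : Prop := ∀ (pattern : String), Dom_get_manufacturer_match_pattern pattern → Pre_get_manufacturer_match_pattern pattern → D_get_manufacturer_match_pattern pattern → get_manufacturer_match_pattern pattern ≠ get_manufacturer_match_pattern_alt pattern

-- ===== LEMMAS AND PROOFS =====
-- signed parenthesis balance of a character list
def pvBal : List Char → Int
  | [] => 0
  | c :: rest => (if c = '(' then 1 else if c = ')' then -1 else 0) + pvBal rest

lemma pvBal_append (xs ys : List Char) : pvBal (xs ++ ys) = pvBal xs + pvBal ys := by
  induction xs with
  | nil => simp [pvBal]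
  | cons c rest ih => simp [pvBal, ih]; ring

lemma pvBal_take_succ (ys : List Char) (i : Nat) (hi : i < ys.length) :
    pvBal (ys.take (i + 1)) = pvBal (ys.take i) +
      (if ys[i] = '(' then 1 else if ys[i] = ')' then -1 else 0) := by
  rw [List.take_add_one, List.getElem?_eq_getElem hi]
  simp only [Option.toList_some]
  rw [pvBal_append]
  simp [pvBal]

lemma pvBal_flat (ys : List Char) (a b : Nat) (hab : a ≤ b) (hb : b ≤ ys.length)
    (hflat : ∀ i, a ≤ i → i < b → ys[i]? ≠ some '(' ∧ ys[i]? ≠ some ')') :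
    pvBal (ys.take b) = pvBal (ys.take a) := by
  induction b with
  | zero =>
    have : a = 0 := by omega
    rw [this]
  | succ b' ih =>
    rcases Nat.eq_or_lt_of_le hab with h | h
    · rw [h]
    · have hb' : b' < ys.length := by omega
      have hfl := hflat b' (by omega) (by omega)
      rw [List.getElem?_eq_getElem hb'] at hfl
      have h1 : ys[b'] ≠ '(' := by simpa using hfl.1
      have h2 : ys[b'] ≠ ')' := by simpa using hfl.2
      rw [pvBal_take_succ ys b' hb', if_neg h1, if_neg h2]
      simp [ih (by omega) (by omega) (fun i hi1 hi2 => hflat i hi1 (by omega))]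

lemma pvFind_singleton (ys : List Char) (ch : Char) :
    PySem.Chars.find ys [ch] = ((ys.findIdx? (· == ch)).elim (-1 : Int) (fun n => (n : Int))) := by
  cases hf : ys.findIdx? (· == ch) with
  | none =>
    have hmem : ch ∉ ys := by
      intro hm
      rcases List.findIdx?_eq_none_iff.mp hf ch hm with h
      simp at h
    have : ¬ [ch] <:+: ys := by rw [List.singleton_infix_iff]; exact hmem
    simp [(PySem.Chars.find_eq_neg_one_iff ys [ch]).mpr this]
  | some i =>
    obtain ⟨hi, hget, hmin⟩ := List.findIdx?_eq_some_iff_getElem.mp hf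
    have hmem : ch ∈ ys := by
      have := hget; simp at this; exact this ▸ List.getElem_mem hi
    have hinf : [ch] <:+: ys := (List.singleton_infix_iff ch ys).mpr hmem
    have hnn : 0 ≤ PySem.Chars.find ys [ch] := (PySem.Chars.find_nonneg_iff ys [ch]).mpr hinf
    obtain ⟨hpre, hfirst⟩ := PySem.Chars.find_spec hnn
    set t := (PySem.Chars.find ys [ch]).toNat with ht
    -- ys[t] = ch
    have hyt : ys[t]? = some ch := by
      obtain ⟨tail, htl⟩ := hpre
      have : t < ys.length := by
        by_contra hc
        push_neg at hc
        have : ys.drop t = [] := List.drop_eq_nil_of_le hc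
        rw [this] at htl; simp at htl
      have h0 := congrArg (fun l => l[0]?) htl
      simp only [List.getElem?_cons_zero] at h0
      rw [List.getElem?_drop] at h0
      simpa using h0.symm
    -- i = t
    have hit : i = t := by
      rcases lt_trichotomy i t with h | h | h
      · exfalso
        apply hfirst i h
        exact ⟨ys.drop (i+1), by
          have : ys[i] = ch := by simpa using hget
          rw [List.drop_eq_getElem_cons hi, this]
          rfl⟩
      · exact h
      · exfalso
        have : t < ys.length := by
          rw [List.getElem?_eq_some_iff] at hyt; exact hyt.1
        have hne := hmin t h
        rw [List.getElem?_eq_getElem this] at hyt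
        simp at hyt
        simp [hyt] at hne
    simp only [hf, Option.elim, hit, ht]
    omega

lemma pvMatchClose_none (ys : List Char) (d : Int) (h : ')' ∉ ys) : pvMatchClose ys d = none := by
  induction ys generalizing d with
  | nil => rfl
  | cons c rest ih =>
    simp only [List.mem_cons, not_or] at h
    have hc : c ≠ ')' := fun hc => h.1 hc.symm
    simp [pvMatchClose, hc, ih _ h.2]

lemma pvMatchClose_spec (ys : List Char) (d : Int) (m : Nat) (hd : 0 < d)
    (h : pvMatchClose ys d = some m) :
    m < ys.length ∧ ys[m]? = some ')' ∧ d + pvBal (ys.take (m + 1)) = 0 ∧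
      ∀ k < m, 0 < d + pvBal (ys.take (k + 1)) := by
  induction ys generalizing d m with
  | nil => simp [pvMatchClose] at h
  | cons c rest ih =>
    by_cases h1 : c = '('
    · simp only [pvMatchClose, h1, if_pos rfl] at h
      cases hm' : pvMatchClose rest (d + 1) with
      | none => rw [hm'] at h; simp at h
      | some m' =>
      rw [hm'] at h
      obtain rfl : m' + 1 = m := by simpa using h
      obtain ⟨hl, hg, hb, hp⟩ := ih (d + 1) m' (by omega) hm'
      refine ⟨by simpa using hl, by simpa using hg, ?_, ?_⟩
      · simp [pvBal, h1]; omega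
      · intro k hk
        cases k with
        | zero => simp [pvBal, h1]; omega
        | succ k' =>
          have := hp k' (by omega)
          simp [pvBal, h1]; omega
    · by_cases h2 : c = ')'
      · simp only [pvMatchClose, h1, h2, if_neg h1, if_pos rfl] at h
        by_cases h3 : d - 1 = 0
        · rw [if_pos h3] at h
          obtain rfl : m = 0 := by simpa using h.symm
          refine ⟨by simp, by simp [h2], by simp [pvBal, h1, h2]; omega, by omega⟩
        · rw [if_neg h3] at h
          cases hm' : pvMatchClose rest (d - 1) with
          | none => rw [hm'] at h; simp at h
          | some m' =>
          rw [hm'] at h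
          obtain rfl : m' + 1 = m := by simpa using h
          obtain ⟨hl, hg, hb, hp⟩ := ih (d - 1) m' (by omega) hm'
          refine ⟨by simpa using hl, by simpa using hg, ?_, ?_⟩
          · simp [pvBal, h1, h2]; omega
          · intro k hk
            cases k with
            | zero => simp [pvBal, h1, h2]; omega
            | succ k' =>
              have := hp k' (by omega)
              simp [pvBal, h1, h2]; omega
      · simp only [pvMatchClose, if_neg h1, if_neg h2] at h
        cases hm' : pvMatchClose rest d with
        | none => rw [hm'] at h; simp at h
        | some m' =>
        rw [hm'] at h
        obtain rfl : m' + 1 = m := by simpa using h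
        obtain ⟨hl, hg, hb, hp⟩ := ih d m' hd hm'
        refine ⟨by simpa using hl, by simpa using hg, ?_, ?_⟩
        · simp [pvBal, h1, h2]; omega
        · intro k hk
          cases k with
          | zero => simp [pvBal, h1, h2]; omega
          | succ k' =>
            have := hp k' (by omega)
            simp [pvBal, h1, h2]; omega

lemma pvBLoop_eq (ys : List Char) : ∀ (acc : List Char) (d : Int),
    pvBLoop d acc ys = (pvMatchClose ys d).map (fun m => acc.reverse ++ ys.take (m + 1)) := by
  induction ys with
  | nil => intro acc d; rfl
  | cons c rest ih =>
    intro acc d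
    by_cases h1 : c = '('
    · simp only [pvBLoop, pvMatchClose, h1, if_pos rfl, ih]
      cases pvMatchClose rest (d + 1) <;> simp
    · by_cases h2 : c = ')'
      · by_cases h3 : d - 1 = 0
        · simp [pvBLoop, pvMatchClose, h1, h2, h3]
        · simp only [pvBLoop, pvMatchClose, h1, h2, if_neg h1, if_pos rfl, if_neg h3, ih]
          cases pvMatchClose rest (d - 1) <;> simp
      · simp only [pvBLoop, pvMatchClose, if_neg h1, if_neg h2, ih]
        cases pvMatchClose rest d <;> simp

lemma pvMatchClose_spec0 (ys : List Char) (m : Nat) (h0 : ys[0]? = some '(')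
    (h : pvMatchClose ys 0 = some m) :
    m < ys.length ∧ ys[m]? = some ')' ∧ pvBal (ys.take (m + 1)) = 0 ∧
      ∀ k < m, 0 < pvBal (ys.take (k + 1)) := by
  cases ys with
  | nil => simp at h0
  | cons c rest =>
    have hc : c = '(' := by simpa using h0
    subst hc
    simp only [pvMatchClose, if_pos rfl, zero_add] at h
    cases hm' : pvMatchClose rest (1:Int) with
    | none => rw [hm'] at h; simp at h
    | some m' =>
    rw [hm'] at h
    obtain rfl : m' + 1 = m := by simpa using h
    obtain ⟨hl, hg, hb, hp⟩ := pvMatchClose_spec rest (1:Int) m' (by omega) hm'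
    refine ⟨by simpa using hl, by simpa using hg, ?_, ?_⟩
    · simp [pvBal]; omega
    · intro k hk
      cases k with
      | zero => simp [pvBal]
      | succ k' =>
        have := hp k' (by omega)
        simp [pvBal]; omega

lemma pvFindFrom_next (cs : List Char) (t : Nat) (ht : t ≤ cs.length) (ch : Char) :
    PySem.Chars.findFrom cs [ch] ((t : Int)) none =
      (((cs.drop t).findIdx? (· == ch)).elim (-1 : Int) (fun n => ((t + n : Nat) : Int))) := by
  rw [PySem.Chars.findFrom_natCast cs [ch] t ht, pvFind_singleton]
  cases (cs.drop t).findIdx? (· == ch) with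
  | none => simp
  | some n => simp

lemma pvALoop_main (cs : List Char) (opn : Nat) (m : Nat)
    (hm : pvMatchClose (cs.drop opn) 0 = some m)
    (hop : (cs.drop opn)[0]? = some '(')
    (hpar : '(' ∈ cs.drop (opn + m + 1)) :
    ∀ (fuel k : Nat) (close : Int), k < m → m - k < fuel →
      pvALoop cs fuel ((opn + k : Nat) : Int) (pvBal ((cs.drop opn).take (k + 1))) close
        = some ((opn + m : Nat) : Int) := by
  obtain ⟨hl, hg, hb0, hpos⟩ := pvMatchClose_spec0 _ m hop hm
  set ys := cs.drop opn with hys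
  have hlen : ys.length = cs.length - opn := by simp [hys]
  have hcslen : opn + m + 1 ≤ cs.length := by omega
  intro fuel
  induction fuel with
  | zero => intro k close hk hf; omega
  | succ f ihf =>
    intro k close hk hf
    -- the guard: depth > 0
    have hdep : 0 < pvBal (ys.take (k + 1)) := hpos k hk
    set t : Nat := opn + k + 1 with htdef
    have ht : t ≤ cs.length := by omega
    set zs : List Char := cs.drop t with hzs
    have hzys : zs = ys.drop (k + 1) := by
      rw [hzs, hys, List.drop_drop]
      try congr 1
      try omega
    have hzget : ∀ i : Nat, zs[i]? = ys[k + 1 + i]? := by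
      intro i
      rw [hzys, List.getElem?_drop]
    -- next ')'
    have hmem_c : ')' ∈ zs := by
      have hmk : m - (k+1) < zs.length := by
        rw [hzys, List.length_drop]; omega
      have : zs[m - (k+1)]? = some ')' := by
        rw [hzget]; have : k + 1 + (m - (k+1)) = m := by omega
        rw [this]; exact hg
      exact List.mem_of_getElem? this
    obtain ⟨jc, hjc⟩ : ∃ jc, zs.findIdx? (· == ')') = some jc := by
      cases hfi : zs.findIdx? (· == ')') with
      | none =>
        exfalso
        rcases List.findIdx?_eq_none_iff.mp hfi ')' hmem_c with h
        simp at h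
      | some j => exact ⟨j, rfl⟩
    obtain ⟨hjc_lt, hjc_get, hjc_min⟩ := List.findIdx?_eq_some_iff_getElem.mp hjc
    have hjc_get' : zs[jc]? = some ')' := by
      rw [List.getElem?_eq_getElem hjc_lt]; simpa using hjc_get
    have hjc_le : k + 1 + jc ≤ m := by
      by_contra hcon
      push_neg at hcon
      have hmk : m - (k+1) < jc := by omega
      have := hjc_min (m - (k+1)) hmk
      have hz : zs[m - (k+1)]? = some ')' := by
        rw [hzget]; have h2 : k + 1 + (m - (k+1)) = m := by omega
        rw [h2]; exact hg
      have hlt : m - (k+1) < zs.length := by rw [hzys, List.length_drop]; omega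
      rw [List.getElem?_eq_getElem hlt] at hz
      simp at hz
      simp [hz] at this
    -- next '('
    have hmem_o : '(' ∈ zs := by
      have : cs.drop (opn + m + 1) = zs.drop (m - k) := by
        rw [hzs, List.drop_drop]; congr 1; omega
      rw [this] at hpar
      exact List.mem_of_mem_drop hpar
    obtain ⟨jo, hjo⟩ : ∃ jo, zs.findIdx? (· == '(') = some jo := by
      cases hfi : zs.findIdx? (· == '(') with
      | none =>
        exfalso
        rcases List.findIdx?_eq_none_iff.mp hfi '(' hmem_o with h
        simp at h
      | some j => exact ⟨j, rfl⟩
    obtain ⟨hjo_lt, hjo_get, hjo_min⟩ := List.findIdx?_eq_some_iff_getElem.mp hjo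
    have hjo_get' : zs[jo]? = some '(' := by
      rw [List.getElem?_eq_getElem hjo_lt]; simpa using hjo_get
    have hjne : jo ≠ jc := by
      intro h; rw [h, hjc_get'] at hjo_get'; simp at hjo_get'
    -- compute o and c
    have hcast : ((opn + k : Nat) : Int) + 1 = ((t : Nat) : Int) := by push_cast; omega
    have ho : PySem.Chars.findFrom cs ['('] (((opn + k : Nat) : Int) + 1) none = ((t + jo : Nat) : Int) := by
      rw [hcast, pvFindFrom_next cs t ht, hjo]; rfl
    have hc : PySem.Chars.findFrom cs [')'] (((opn + k : Nat) : Int) + 1) none = ((t + jc : Nat) : Int) := by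
      rw [hcast, pvFindFrom_next cs t ht, hjc]; rfl
    -- flatness before the next paren
    have hflat : ∀ i, k + 1 ≤ i → i < k + 1 + min jo jc → ys[i]? ≠ some '(' ∧ ys[i]? ≠ some ')' := by
      intro i h1 h2
      have hi : i - (k+1) < min jo jc := by omega
      have hieq : i = k + 1 + (i - (k+1)) := by omega
      constructor
      · intro hcon
        have := hjo_min (i - (k+1)) (by omega)
        rw [hieq, ← hzget] at hcon
        have hilt : i - (k+1) < zs.length := by omega
        rw [List.getElem?_eq_getElem hilt] at hcon
        simp at hcon; simp [hcon] at this
      · intro hcon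
        have := hjc_min (i - (k+1)) (by omega)
        rw [hieq, ← hzget] at hcon
        have hilt : i - (k+1) < zs.length := by omega
        rw [List.getElem?_eq_getElem hilt] at hcon
        simp at hcon; simp [hcon] at this
    rcases Nat.lt_or_ge jo jc with hlt | hge
    · -- next paren is '(' at relative jo; recurse deeper
      set k' : Nat := k + 1 + jo with hk'def
      have hk'm : k' < m := by omega
      have hk'len : k' < ys.length := by omega
      have hysk' : ys[k'] = '(' := by
        have := hzget jo; rw [hjo_get'] at this
        rw [List.getElem?_eq_getElem hk'len] at this
        simpa using this.symm
      have hbal' : pvBal (ys.take (k' + 1)) = pvBal (ys.take (k + 1)) + 1 := by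
        rw [pvBal_take_succ ys k' hk'len, if_pos hysk']
        rw [pvBal_flat ys (k+1) k' (by omega) (by omega)
          (fun i h1 h2 => hflat i h1 (by omega))]
      have hocmp : ((t + jo : Nat) : Int) < ((t + jc : Nat) : Int) := by
        push_cast; omega
      simp only [pvALoop, if_pos hdep]
      rw [ho, hc, if_pos hocmp]
      have harg : ((t + jo : Nat) : Int) = ((opn + k' : Nat) : Int) := by push_cast; omega
      rw [harg]
      rw [← hbal']
      exact ihf k' close hk'm (by omega)
    · -- next paren is ')' at relative jc
      have hlt2 : jc < jo := by omega
      set k' : Nat := k + 1 + jc with hk'def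
      have hk'm : k' ≤ m := by omega
      have hk'len : k' < ys.length := by omega
      have hysk' : ys[k'] = ')' := by
        have := hzget jc; rw [hjc_get'] at this
        rw [List.getElem?_eq_getElem hk'len] at this
        simpa using this.symm
      have hbal' : pvBal (ys.take (k' + 1)) = pvBal (ys.take (k + 1)) - 1 := by
        rw [pvBal_take_succ ys k' hk'len, if_neg (by simp [hysk']), if_pos hysk']
        rw [pvBal_flat ys (k+1) k' (by omega) (by omega)
          (fun i h1 h2 => hflat i h1 (by omega))]
        ring
      have hocmp : ¬ ((t + jo : Nat) : Int) < ((t + jc : Nat) : Int) := by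
        push_cast; omega
      simp only [pvALoop, if_pos hdep]
      rw [ho, hc, if_neg hocmp]
      have harg : ((t + jc : Nat) : Int) = ((opn + k' : Nat) : Int) := by push_cast; omega
      rw [harg]
      rcases Nat.eq_or_lt_of_le hk'm with heq | hlt3
      · -- reached the matching close: depth hits 0, loop exits returning close' = opn+m
        have hdep0 : pvBal (ys.take (k + 1)) - 1 = 0 := by
          rw [← hbal', heq, hb0]
        obtain ⟨f', rfl⟩ : ∃ f', f = f' + 1 := ⟨f - 1, by omega⟩
        rw [hdep0]
        simp only [pvALoop]
        rw [if_neg (by omega)]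
        rw [heq]
      · -- intermediate close: depth stays positive, recurse
        rw [← hbal']
        exact ihf k' ((opn + k' : Nat) : Int) hlt3 (by omega)

lemma pvTag_at (cs : List Char) (h : 0 ≤ PySem.Chars.find cs "(?P<manufacturer>".toList) :
    ∃ rest, cs.drop (PySem.Chars.find cs "(?P<manufacturer>".toList).toNat
      = '(' :: '?' :: 'P' :: '<' :: 'm' :: 'a' :: 'n' :: 'u' :: 'f' :: 'a' :: 'c' :: 't' :: 'u' :: 'r' :: 'e' :: 'r' :: '>' :: rest := by
  obtain ⟨hpre, -⟩ := PySem.Chars.find_spec h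
  obtain ⟨rest, hrest⟩ := hpre
  exact ⟨rest, by simpa using hrest.symm⟩

lemma pvMainEqual : ∀ (pattern : String),
    Pre_get_manufacturer_match_pattern pattern →
    ¬ D_get_manufacturer_match_pattern pattern →
    get_manufacturer_match_pattern pattern = get_manufacturer_match_pattern_alt pattern := by
  intro pattern hpre hnd
  set cs := pattern.toList with hcs
  set opI := PySem.Chars.find cs "(?P<manufacturer>".toList with hopI
  by_cases hge : 0 ≤ opI
  · set opn := opI.toNat with hopn
    have hopIn : opI = (opn : Int) := (Int.toNat_of_nonneg hge).symm
    obtain ⟨rest, hrest⟩ := pvTag_at cs hge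
    have hop0 : (cs.drop opn)[0]? = some '(' := by rw [hrest]; rfl
    have hdl2 : cs.length - opn = rest.length + 17 := by
      have := congrArg List.length hrest
      simpa using this
    have hlt : opn < cs.length := by omega
    -- use the precondition
    rw [Pre_get_manufacturer_match_pattern, pvPreB] at hpre
    rw [← hopI, if_neg (by omega)] at hpre
    cases hmc : pvMatchClose (cs.drop opn) 0 with
    | none =>
      exfalso
      apply hnd
      rw [hmc] at hpre
      constructor
      · exact hge
      · simpa using hpre
    | some m =>
      rw [hmc] at hpre
      have hpar : '(' ∈ cs.drop (opn + m + 1) := by simpa using hpre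
      obtain ⟨hl, hg, hb0, hpos⟩ := pvMatchClose_spec0 _ m hop0 hmc
      have hm0 : 0 < m := by
        rcases Nat.eq_zero_or_pos m with h0 | h0
        · exfalso; rw [h0, hop0] at hg; simp at hg
        · exact h0
      have hbal1 : pvBal ((cs.drop opn).take (0 + 1)) = 1 := by
        rw [hrest]; rfl
      have hmlen : m < cs.length - opn := by
        have := hl; rwa [List.length_drop] at this
      have hA := pvALoop_main cs opn m hmc hop0 hpar (cs.length + 1) 0 0 hm0 (by omega)
      rw [hbal1] at hA
      have hA' : pvALoop cs (cs.length + 1) ((opn : Nat) : Int) 1 0 = some ((opn + m : Nat) : Int) := by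
        rw [show ((opn : Nat) : Int) = ((opn + 0 : Nat) : Int) by norm_num]
        exact hA
      have hslice : PySem.List.slice cs (some ((opn : Nat) : Int)) (some (((opn + m : Nat) : Int) + 1))
          = ((cs.drop opn).take (m + 1)) := by
        have hb : (((opn + m : Nat) : Int) + 1) = ((opn + m + 1 : Nat) : Int) := by push_cast; ring
        rw [hb, PySem.List.slice_natCast]
        congr 1
        omega
      -- reduce port A
      rw [get_manufacturer_match_pattern]
      simp only [← hcs, ← hopI]
      rw [if_pos hge, hopIn]
      simp only [hA', hslice]
      -- reduce port B
      rw [get_manufacturer_match_pattern_alt]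
      simp only [← hcs, ← hopI]
      rw [if_neg (show ¬ opI < 0 by omega), ← hopn, pvBLoop_eq, hmc]
      simp only [Option.map_some, List.reverse_nil, List.nil_append]
  · rw [get_manufacturer_match_pattern, get_manufacturer_match_pattern_alt]
    simp only [← hcs, ← hopI]
    rw [if_neg hge, if_pos (by omega)]

lemma pvMainTight : ∀ (pattern : String),
    Pre_get_manufacturer_match_pattern pattern →
    D_get_manufacturer_match_pattern pattern →
    get_manufacturer_match_pattern pattern ≠ get_manufacturer_match_pattern_alt pattern := by
  intro pattern hpre hd
  obtain ⟨hge, hnocl⟩ := hd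
  set cs := pattern.toList with hcs
  set opI := PySem.Chars.find cs "(?P<manufacturer>".toList with hopI
  set opn := opI.toNat with hopn
  have hopIn : opI = (opn : Int) := (Int.toNat_of_nonneg hge).symm
  obtain ⟨rest, hrest⟩ := pvTag_at cs hge
  have hdl2 : cs.length - opn = rest.length + 17 := by
    have := congrArg List.length hrest
    simpa using this
  have hlt : opn < cs.length := by omega
  have htail : (cs.drop opn).tail = cs.drop (opn + 1) := by
    rw [List.tail_drop]
  have hnoys : ')' ∉ cs.drop opn := by
    intro hmem
    apply hnocl
    have hmem' : ')' ∈ rest := by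
      rw [hrest] at hmem
      simpa using hmem
    rw [← htail, hrest]
    simp [hmem']
  -- port B returns none
  have hB : get_manufacturer_match_pattern_alt pattern = none := by
    rw [get_manufacturer_match_pattern_alt]
    simp only [← hcs, ← hopI]
    rw [if_neg (by omega), ← hopn, pvBLoop_eq, pvMatchClose_none _ _ hnoys]
    rfl
  -- port A returns some ""
  have hA : get_manufacturer_match_pattern pattern = some (String.mk []) := by
    rw [get_manufacturer_match_pattern]
    simp only [← hcs, ← hopI]
    rw [if_pos hge]
    -- one loop iteration
    obtain ⟨L, hL⟩ : ∃ L, cs.length = L + 1 := ⟨cs.length - 1, by omega⟩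
    have hc : PySem.Chars.findFrom cs [')'] (opI + 1) none = (-1 : Int) := by
      rw [hopIn]
      have : ((opn : Nat) : Int) + 1 = ((opn + 1 : Nat) : Int) := by push_cast; ring
      rw [this, pvFindFrom_next cs (opn + 1) (by omega)]
      have : (cs.drop (opn + 1)).findIdx? (· == ')') = none := by
        rw [List.findIdx?_eq_none_iff]
        intro x hx
        simp only [beq_eq_false_iff_ne, ne_eq]
        intro hxe
        exact hnocl (hxe ▸ hx)
      rw [this]
      rfl
    have hstep : pvALoop cs (cs.length + 1) opI 1 0 = some (-1 : Int) := by
      rw [hL]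
      show pvALoop cs (L + 1 + 1) opI 1 0 = some (-1 : Int)
      simp only [pvALoop]
      rw [if_pos (by norm_num), hc]
      have hno : ¬ PySem.Chars.findFrom cs ['('] (opI + 1) none < (-1 : Int) := by
        rw [hopIn]
        have h1 : ((opn : Nat) : Int) + 1 = ((opn + 1 : Nat) : Int) := by push_cast; ring
        rw [h1, pvFindFrom_next cs (opn + 1) (by omega)]
        cases (cs.drop (opn + 1)).findIdx? (· == '(') with
        | none => simp
        | some j => simp only [Option.elim]; omega
      rw [if_neg hno]
      norm_num
    simp only [hstep]
    have hslice : PySem.List.slice cs (some opI) (some ((-1 : Int) + 1)) = [] := by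
      rw [hopIn]
      have h0 : ((-1 : Int) + 1) = ((0 : Nat) : Int) := by norm_num
      rw [h0, PySem.List.slice_natCast]
      simp
    simp only [hslice]
    have hne : ([] : List Char) ≠ "(?P<manufacturer>\\w+)".toList := by decide
    rw [if_neg hne]
  rw [hA, hB]
  simp

-- ===== VERDICT (by name: the statement is the Claim_ definition above) =====
theorem get_manufacturer_match_pattern_spec : Claim_unchanged_get_manufacturer_match_pattern := by
  intro pattern _ hpre hnd
  exact pvMainEqual pattern hpre hnd

theorem get_manufacturer_match_pattern_changed : Claim_changed_get_manufacturer_match_pattern := by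
  unfold Claim_changed_get_manufacturer_match_pattern; decide

theorem get_manufacturer_match_pattern_tight : Claim_exact_get_manufacturer_match_pattern := by
  intro pattern _ hpre hd
  exact pvMainTight pattern hpre hd
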